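-- pv_equiv track=rewrite | github.com/hassanmzia/Eminence-HealthOS | modules/rpm/agents/triage_agent.py | _determine_esi
-- ===== SOURCE A (Python) =====
-- def _determine_esi(complaint: str, symptoms: list, risk_score, max_severity: str) -> int:
--     # Critical signals → ESI 1
--     critical_keywords = ["unresponsive", "cardiac arrest", "not breathing", "seizure", "hemorrhage"]
--     if any(kw in complaint.lower() for kw in critical_keywords):
--         return 1
--
--     # High risk → ESI 2
--     if max_severity in ("CRITICAL", "EMERGENCY") or (risk_score and risk_score >= 7):
--         return 2
--
--     # Multiple urgent signals → ESI 3
--     urgent_keywords = ["chest pain", "shortness of breath", "severe pain", "confusion", "fever"]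
--     urgent_count = sum(1 for kw in urgent_keywords if kw in complaint.lower())
--     if urgent_count >= 1 or max_severity == "HIGH" or (risk_score and risk_score >= 5):
--         return 3
--
--     # Some concerns → ESI 4
--     if symptoms or max_severity == "MEDIUM" or (risk_score and risk_score >= 3):
--         return 4
--
--     # Otherwise → ESI 5
--     return 5
-- ===== SOURCE B (Python) =====
-- def _determine_esi(complaint: str, symptoms: list, risk_score, max_severity: str) -> int:
--     # Per-signal decomposition: each independent signal (keywords, severity,
--     # risk score, symptoms) is mapped to its own ESI level via data tables,
--     # and the overall level is the most severe (minimum) of the channels.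
--     KEYWORD_LEVEL = {
--         "unresponsive": 1, "cardiac arrest": 1, "not breathing": 1,
--         "seizure": 1, "hemorrhage": 1,
--         "chest pain": 3, "shortness of breath": 3, "severe pain": 3,
--         "confusion": 3, "fever": 3,
--     }
--     SEVERITY_LEVEL = {"CRITICAL": 2, "EMERGENCY": 2, "HIGH": 3, "MEDIUM": 4}
--     c = complaint.lower()
--     kw_level = min((lvl for kw, lvl in KEYWORD_LEVEL.items() if kw in c), default=5)
--     sev_level = SEVERITY_LEVEL.get(max_severity, 5)
--     if risk_score:
--         risk_level = 2 if risk_score >= 7 else 3 if risk_score >= 5 else 4 if risk_score >= 3 else 5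
--     else:
--         risk_level = 5
--     sym_level = 4 if symptoms else 5
--     return min(kw_level, sev_level, risk_level, sym_level)
-- ===== Notes on version B (the rewrite author's own statement) =====
-- stated objective: alternative
-- what changed: Replaced the ordered per-level early-return cascade by a per-signal decomposition: each independent input channel (keyword table, severity table, risk-score thresholds, symptoms) is mapped to its own ESI level via data tables, and the result is the minimum over the four channel levels.
import Mathlib
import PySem

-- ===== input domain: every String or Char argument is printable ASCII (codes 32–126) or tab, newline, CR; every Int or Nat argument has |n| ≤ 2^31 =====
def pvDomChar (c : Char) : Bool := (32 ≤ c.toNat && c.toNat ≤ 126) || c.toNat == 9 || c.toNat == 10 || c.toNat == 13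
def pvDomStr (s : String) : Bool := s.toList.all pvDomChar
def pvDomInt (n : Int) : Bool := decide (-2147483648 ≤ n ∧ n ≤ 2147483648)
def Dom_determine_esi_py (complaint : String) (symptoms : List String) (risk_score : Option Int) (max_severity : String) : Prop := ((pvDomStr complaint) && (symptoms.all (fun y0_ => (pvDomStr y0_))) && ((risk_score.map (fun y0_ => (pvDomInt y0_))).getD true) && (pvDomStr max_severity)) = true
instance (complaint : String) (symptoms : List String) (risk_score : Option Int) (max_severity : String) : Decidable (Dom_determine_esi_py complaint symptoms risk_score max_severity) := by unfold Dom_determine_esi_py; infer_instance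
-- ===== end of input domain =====

-- B replaces A's ordered early-return cascade by a per-signal decomposition: each channel
-- (keyword table, severity table, risk thresholds, symptoms) yields its own level, result = min.

-- ===== PORT A =====
-- Python 'risk_score and risk_score >= k': falsy (None/0) short-circuits to False.
def pyTruthGe (rs : Option Int) (k : Int) : Bool :=
  match rs with
  | none => false
  | some n => if n == 0 then false else decide (k ≤ n)

def determine_esi_py (complaint : String) (symptoms : List String) (risk_score : Option Int) (max_severity : String) : Int :=
  let critical_keywords := ["unresponsive", "cardiac arrest", "not breathing", "seizure", "hemorrhage"]
  if critical_keywords.any (fun kw => PySem.Str.isIn kw (PySem.Str.lower complaint)) then 1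
  else if (max_severity == "CRITICAL" || max_severity == "EMERGENCY") || pyTruthGe risk_score 7 then 2
  else
    let urgent_keywords := ["chest pain", "shortness of breath", "severe pain", "confusion", "fever"]
    let urgent_count : Int := urgent_keywords.foldl (fun acc kw => if PySem.Str.isIn kw (PySem.Str.lower complaint) then acc + 1 else acc) 0
    if decide (1 ≤ urgent_count) || max_severity == "HIGH" || pyTruthGe risk_score 5 then 3
    else if (!symptoms.isEmpty) || max_severity == "MEDIUM" || pyTruthGe risk_score 3 then 4
    else 5

-- ===== PORT B =====
-- KEYWORD_LEVEL.items() of Source B (dict literal with 10 distinct keys, insertion order)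
def kwLevelPairs : List (String × Int) :=
  [("unresponsive", 1), ("cardiac arrest", 1), ("not breathing", 1), ("seizure", 1), ("hemorrhage", 1),
   ("chest pain", 3), ("shortness of breath", 3), ("severe pain", 3), ("confusion", 3), ("fever", 3)]

-- SEVERITY_LEVEL of Source B
def sevLevelDict : PySem.Dict String Int :=
  PySem.Dict.ofList [("CRITICAL", 2), ("EMERGENCY", 2), ("HIGH", 3), ("MEDIUM", 4)]

-- B's risk channel: 'if risk_score: … conditional expression … else: 5'
def riskChannel (risk_score : Option Int) : Int :=
  match risk_score with
  | none => 5
  | some n => if n == 0 then 5  -- 'if risk_score:' falsy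
              else if (7 : Int) ≤ n then 2 else if (5 : Int) ≤ n then 3 else if (3 : Int) ≤ n then 4 else 5

def determine_esi_py_alt (complaint : String) (symptoms : List String) (risk_score : Option Int) (max_severity : String) : Int :=
  let c := PySem.Str.lower complaint
  -- min((lvl for kw, lvl in KEYWORD_LEVEL.items() if kw in c), default=5)
  let kw_level : Int := (PySem.List.min? ((kwLevelPairs.filter (fun p => PySem.Str.isIn p.1 c)).map Prod.snd) (fun x => x)).getD 5
  let sev_level : Int := sevLevelDict.getD max_severity 5
  let risk_level : Int := riskChannel risk_score
  let sym_level : Int := if !symptoms.isEmpty then 4 else 5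
  min kw_level (min sev_level (min risk_level sym_level))

-- ===== PRECONDITION & SPEC =====
def Spec_determine_esi_py (complaint : String) (symptoms : List String) (risk_score : Option Int) (max_severity : String) (out : Int) : Prop := out = determine_esi_py_alt complaint symptoms risk_score max_severity
instance (complaint : String) (symptoms : List String) (risk_score : Option Int) (max_severity : String) (out : Int) : Decidable (Spec_determine_esi_py complaint symptoms risk_score max_severity out) := by unfold Spec_determine_esi_py; infer_instance

-- ===== CLAIM (what is proved, stated in full; the proofs are below) =====
def Claim_equal_determine_esi_py : Prop := ∀ (complaint : String) (symptoms : List String) (risk_score : Option Int) (max_severity : String), Dom_determine_esi_py complaint symptoms risk_score max_severity → Spec_determine_esi_py complaint symptoms risk_score max_severity (determine_esi_py complaint symptoms risk_score max_severity)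

-- ===== LEMMAS AND PROOFS =====

-- B's keyword channel equals: 1 if any critical keyword matched, else 3 if any urgent, else 5.
theorem kw_channel (c : String) :
    (PySem.List.min? ((kwLevelPairs.filter (fun p => PySem.Str.isIn p.1 c)).map Prod.snd) (fun x => x)).getD 5
    = (if ["unresponsive", "cardiac arrest", "not breathing", "seizure", "hemorrhage"].any (fun kw => PySem.Str.isIn kw c) then 1
       else if ["chest pain", "shortness of breath", "severe pain", "confusion", "fever"].any (fun kw => PySem.Str.isIn kw c) then 3
       else 5) := by
  by_cases hc : (["unresponsive", "cardiac arrest", "not breathing", "seizure", "hemorrhage"].any (fun kw => PySem.Str.isIn kw c)) = true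
  · -- some critical keyword matches: the filtered levels contain 1 and are all ≥ 1
    obtain ⟨kw, hkwmem, hkw⟩ := List.any_eq_true.mp hc
    have hpair : (kw, (1 : Int)) ∈ kwLevelPairs.filter (fun p => PySem.Str.isIn p.1 c) := by
      refine List.mem_filter.mpr ⟨?_, hkw⟩
      fin_cases hkwmem <;> simp [kwLevelPairs]
    have h1mem : (1 : Int) ∈ (kwLevelPairs.filter (fun p => PySem.Str.isIn p.1 c)).map Prod.snd :=
      List.mem_map.mpr ⟨_, hpair, rfl⟩
    rw [if_pos hc]
    cases hm : PySem.List.min? ((kwLevelPairs.filter (fun p => PySem.Str.isIn p.1 c)).map Prod.snd) (fun x => x) with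
    | none =>
      rw [Iff.mp (PySem.List.min?_eq_none_iff _ _) hm] at h1mem
      simp at h1mem
    | some m =>
      have hmem := PySem.List.min?_mem hm
      have hle : m ≤ 1 := PySem.List.min?_isMin hm 1 h1mem
      have hge : 1 ≤ m := by
        obtain ⟨p, hpf, rfl⟩ := List.mem_map.mp hmem
        have hp := (List.mem_filter.mp hpf).1
        fin_cases hp <;> norm_num
      have hm1 : m = 1 := le_antisymm hle hge
      rw [hm1]
      rfl
  · have hcrit : ∀ kw ∈ ["unresponsive", "cardiac arrest", "not breathing", "seizure", "hemorrhage"], ¬ PySem.Str.isIn kw c = true := by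
      simpa using List.any_eq_false.mp (Bool.eq_false_iff.mpr hc)
    rw [if_neg hc]
    by_cases hu : (["chest pain", "shortness of breath", "severe pain", "confusion", "fever"].any (fun kw => PySem.Str.isIn kw c)) = true
    · -- no critical, some urgent: the filtered levels contain 3 and are all ≥ 3
      obtain ⟨kw, hkwmem, hkw⟩ := List.any_eq_true.mp hu
      have hpair : (kw, (3 : Int)) ∈ kwLevelPairs.filter (fun p => PySem.Str.isIn p.1 c) := by
        refine List.mem_filter.mpr ⟨?_, hkw⟩
        fin_cases hkwmem <;> simp [kwLevelPairs]
      have h3mem : (3 : Int) ∈ (kwLevelPairs.filter (fun p => PySem.Str.isIn p.1 c)).map Prod.snd :=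
        List.mem_map.mpr ⟨_, hpair, rfl⟩
      rw [if_pos hu]
      cases hm : PySem.List.min? ((kwLevelPairs.filter (fun p => PySem.Str.isIn p.1 c)).map Prod.snd) (fun x => x) with
      | none =>
        rw [Iff.mp (PySem.List.min?_eq_none_iff _ _) hm] at h3mem
        simp at h3mem
      | some m =>
        have hmem := PySem.List.min?_mem hm
        have hle : m ≤ 3 := PySem.List.min?_isMin hm 3 h3mem
        have hge : 3 ≤ m := by
          obtain ⟨p, hpf, rfl⟩ := List.mem_map.mp hmem
          obtain ⟨hp, hpc⟩ := List.mem_filter.mp hpf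
          fin_cases hp
          · exact absurd hpc (hcrit "unresponsive" (by simp))
          · exact absurd hpc (hcrit "cardiac arrest" (by simp))
          · exact absurd hpc (hcrit "not breathing" (by simp))
          · exact absurd hpc (hcrit "seizure" (by simp))
          · exact absurd hpc (hcrit "hemorrhage" (by simp))
          all_goals norm_num
        have hm3 : m = 3 := le_antisymm hle hge
        rw [hm3]
        rfl
    · -- nothing matches: the filter is empty and the default 5 is taken
      have hurg : ∀ kw ∈ ["chest pain", "shortness of breath", "severe pain", "confusion", "fever"], ¬ PySem.Str.isIn kw c = true := by
        simpa using List.any_eq_false.mp (Bool.eq_false_iff.mpr hu)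
      have hnil : kwLevelPairs.filter (fun p => PySem.Str.isIn p.1 c) = [] := by
        rw [List.filter_eq_nil_iff]
        intro p hp
        fin_cases hp
        · exact hcrit "unresponsive" (by simp)
        · exact hcrit "cardiac arrest" (by simp)
        · exact hcrit "not breathing" (by simp)
        · exact hcrit "seizure" (by simp)
        · exact hcrit "hemorrhage" (by simp)
        · exact hurg "chest pain" (by simp)
        · exact hurg "shortness of breath" (by simp)
        · exact hurg "severe pain" (by simp)
        · exact hurg "confusion" (by simp)
        · exact hurg "fever" (by simp)
      rw [if_neg hu, hnil]
      rfl

-- B's severity channel expressed through A's equality tests.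
theorem sev_channel (ms : String) :
    sevLevelDict.getD ms 5
    = (if ms == "CRITICAL" || ms == "EMERGENCY" then 2
       else if ms == "HIGH" then 3
       else if ms == "MEDIUM" then 4
       else 5) := by
  by_cases h1 : ms = "CRITICAL"
  · subst h1; decide
  by_cases h2 : ms = "EMERGENCY"
  · subst h2; decide
  by_cases h3 : ms = "HIGH"
  · subst h3; decide
  by_cases h4 : ms = "MEDIUM"
  · subst h4; decide
  have hd : sevLevelDict = PySem.Dict.mk [("CRITICAL", 2), ("EMERGENCY", 2), ("HIGH", 3), ("MEDIUM", 4)] := by decide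
  simp [hd, PySem.Dict.getD, beq_iff_eq,
        Ne.symm h1, Ne.symm h2, Ne.symm h3, Ne.symm h4, h1, h2, h3, h4, PySem.Dict.get?]

-- B's risk channel expressed through A's per-branch truthiness tests.
theorem risk_channel (rs : Option Int) :
    riskChannel rs
    = (if pyTruthGe rs 7 then 2 else if pyTruthGe rs 5 then 3 else if pyTruthGe rs 3 then 4 else 5) := by
  cases rs with
  | none => rfl
  | some n =>
    by_cases h : n == 0
    · simp [riskChannel, pyTruthGe, h]
    · simp only [riskChannel, pyTruthGe, h, Bool.false_eq_true, if_false, decide_eq_true_eq]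

-- 'sum(1 for kw in kws if p kw) >= 1' equals 'any(p kw for kw in kws)'.
theorem foldl_count (p : String → Bool) (kws : List String) (acc : Int) :
    kws.foldl (fun a kw => if p kw then a + 1 else a) acc = acc + kws.countP p := by
  induction kws generalizing acc with
  | nil => simp
  | cons kw t ih =>
    by_cases h : p kw
    · simp [h, ih]; ring
    · simp [h, ih]

theorem count_ge_one_eq_any (p : String → Bool) (kws : List String) :
    decide (1 ≤ kws.foldl (fun a kw => if p kw then a + 1 else a) (0 : Int)) = kws.any p := by
  rw [foldl_count]
  cases h : kws.any p with
  | false =>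
    have h0 : kws.countP p = 0 := by
      rw [List.countP_eq_zero]
      intro a ha
      simpa using List.any_eq_false.mp h a ha
    simp [h0]
  | true =>
    have h0 : 0 < kws.countP p := by
      rw [List.countP_pos_iff]
      simpa using h
    simp only [zero_add, decide_eq_true_eq]
    exact_mod_cast h0

theorem pyTruthGe_mono {rs : Option Int} {j k : Int} (hjk : j ≤ k) :
    pyTruthGe rs k = true → pyTruthGe rs j = true := by
  cases rs with
  | none => simp [pyTruthGe]
  | some n =>
    by_cases h : n == 0 <;> simp [pyTruthGe, h] <;> omega

-- The cascade over abstract boolean signals equals the min over the per-channel levels,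
-- given that the risk thresholds are monotone (r7 → r5 → r3).
theorem cascade_eq_min (a u s2 s3 s4 sy r7 r5 r3 : Bool)
    (h75 : r7 = true → r5 = true) (h53 : r5 = true → r3 = true) :
    (if a then (1 : Int)
     else if (s2 || r7) then 2
     else if (u || s3 || r5) then 3
     else if (sy || s4 || r3) then 4
     else 5)
    = min (if a then (1 : Int) else if u then 3 else 5)
        (min (if s2 then 2 else if s3 then 3 else if s4 then 4 else 5)
          (min (if r7 then 2 else if r5 then 3 else if r3 then 4 else 5)
            (if sy then 4 else 5))) := by
  revert h75 h53
  cases a <;> cases u <;> cases s2 <;> cases s3 <;> cases s4 <;> cases sy <;>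
    cases r7 <;> cases r5 <;> cases r3 <;> decide

-- ===== VERDICT (by name: the statement is the Claim_ definition above) =====
theorem determine_esi_py_spec : Claim_equal_determine_esi_py := by
  intro complaint symptoms risk_score max_severity _
  unfold Spec_determine_esi_py
  simp only [determine_esi_py, determine_esi_py_alt]
  rw [kw_channel, sev_channel, risk_channel, count_ge_one_eq_any]
  exact cascade_eq_min _ _ _ _ _ _ _ _ _
    (pyTruthGe_mono (by norm_num)) (pyTruthGe_mono (by norm_num))
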